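-- pv_equiv track=rewrite | github.com/helloiamdanteng/nem-dashboard | scraper.py | _infer_region_from_duid
-- ===== SOURCE A (Python) =====
-- def _infer_region_from_duid(duid: str) -> str:
--     """Last-resort region inference from DUID name prefix."""
--     d = duid.upper()
--     # Common patterns: Q=QLD, N=NSW, V=VIC, S=SA, T=TAS prefix in many DUIDs
--     _PREFIX = {
--         "QLD": "QLD1", "NSW": "NSW1", "VIC": "VIC1", "SA1": "SA1",
--         "TAS": "TAS1", "SNO": "NSW1",  # Snowy
--     }
--     for prefix, region in _PREFIX.items():
--         if d.startswith(prefix):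
--             return region
--     # Single-letter prefix used in some DUIDs
--     _SINGLE = {"Q": "QLD1", "N": "NSW1", "V": "VIC1", "S": "SA1", "T": "TAS1"}
--     if d[0] in _SINGLE:
--         return _SINGLE[d[0]]
--     return ""
-- ===== SOURCE B (Python) =====
-- def _infer_region_from_duid(duid: str) -> str:
--     """Last-resort region inference from DUID name prefix."""
--     d = duid.upper()
--     if d.startswith("SNO"):  # Snowy: the only multi-char prefix that disagrees with its first letter
--         return "NSW1"
--     return {"Q": "QLD1", "N": "NSW1", "V": "VIC1", "S": "SA1", "T": "TAS1"}.get(d[0], "")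
-- ===== Notes on version B (the rewrite author's own statement) =====
-- stated objective: simpler
-- what changed: The six-entry prefix loop is collapsed to a single startswith('SNO') check plus a first-letter table lookup, since every other multi-char prefix maps to the same region as its first letter.
import Mathlib
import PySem

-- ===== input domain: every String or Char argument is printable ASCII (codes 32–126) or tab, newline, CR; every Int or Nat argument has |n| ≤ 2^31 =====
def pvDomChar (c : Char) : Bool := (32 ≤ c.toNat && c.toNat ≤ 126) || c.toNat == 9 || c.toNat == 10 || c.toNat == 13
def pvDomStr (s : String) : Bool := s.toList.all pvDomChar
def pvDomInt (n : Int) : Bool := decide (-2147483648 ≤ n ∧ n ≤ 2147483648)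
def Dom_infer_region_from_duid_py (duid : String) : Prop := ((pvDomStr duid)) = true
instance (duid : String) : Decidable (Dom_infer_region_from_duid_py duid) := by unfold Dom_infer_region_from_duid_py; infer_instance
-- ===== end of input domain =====

-- B collapses A's six-entry prefix loop to one startswith("SNO") check plus a first-letter
-- table lookup (objective: simpler). Both raise IndexError on "" (excluded by Pre_).

-- ===== PORT A =====
-- the loop over _PREFIX.items(): first matching prefix wins
def inferRegionPrefixLoop (d : String) : List (String × String) → Option String
  | [] => none
  | (p, r) :: rest =>
      if PySem.Str.startswith d p then some r else inferRegionPrefixLoop d rest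

def infer_region_from_duid_py (duid : String) : String :=
  let d := PySem.Str.upper duid
  let prefixTable : List (String × String) :=
    [("QLD", "QLD1"), ("NSW", "NSW1"), ("VIC", "VIC1"), ("SA1", "SA1"),
     ("TAS", "TAS1"), ("SNO", "NSW1")]
  match inferRegionPrefixLoop d prefixTable with
  | some r => r
  | none =>
    let single : PySem.Dict Char String :=
      PySem.Dict.ofList [('Q', "QLD1"), ('N', "NSW1"), ('V', "VIC1"), ('S', "SA1"), ('T', "TAS1")]
    match PySem.Str.pyGet? d 0 with   -- d[0]; none = IndexError, excluded by Pre_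
    | none => ""
    | some c =>
      match single.get? c with
      | some r => r
      | none => ""

-- ===== PORT B =====
def infer_region_from_duid_py_alt (duid : String) : String :=
  let d := PySem.Str.upper duid
  if PySem.Str.startswith d "SNO" then "NSW1"
  else
    match PySem.Str.pyGet? d 0 with   -- d[0]; none = IndexError, excluded by Pre_
    | none => ""
    | some c =>
      ((PySem.Dict.ofList
        [('Q', "QLD1"), ('N', "NSW1"), ('V', "VIC1"), ('S', "SA1"), ('T', "TAS1")]).get? c).getD ""

-- ===== PRECONDITION & SPEC =====
-- Pre_ excludes only the empty string, on which both A and B raise IndexError at d[0].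
def Pre_infer_region_from_duid_py (duid : String) : Prop := duid ≠ ""
instance (duid : String) : Decidable (Pre_infer_region_from_duid_py duid) := by
  unfold Pre_infer_region_from_duid_py; infer_instance

def pvWitness_infer_region_from_duid_py : String := "SNOWY1"

def Spec_infer_region_from_duid_py (duid : String) (out : String) : Prop := out = infer_region_from_duid_py_alt duid
instance (duid : String) (out : String) : Decidable (Spec_infer_region_from_duid_py duid out) := by unfold Spec_infer_region_from_duid_py; infer_instance

-- ===== CLAIM (what is proved, stated in full; the proofs are below) =====
def Claim_equal_infer_region_from_duid_py : Prop := ∀ (duid : String), Dom_infer_region_from_duid_py duid → Pre_infer_region_from_duid_py duid → Spec_infer_region_from_duid_py duid (infer_region_from_duid_py duid)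

-- ===== LEMMAS AND PROOFS =====

-- l[0] on a cons cell
lemma pyGet_zero_cons {α : Type} (c : α) (rest : List α) :
    PySem.List.pyGet? (c :: rest) 0 = some c := by
  simp [PySem.List.pyGet?, PySem.List.pyIdx?]

-- startswith (for a nonempty pattern) pins the first character
lemma sw_head {l p : List Char} {a : Char}
    (h : PySem.Chars.startswith l (a :: p) = true) : l.head? = some a := by
  obtain ⟨t, ht⟩ := (PySem.Chars.startswith_iff l (a :: p)).mp h
  simp [← ht]

lemma agree_on_nonempty (duid : String) (h : duid ≠ "") :
    infer_region_from_duid_py duid = infer_region_from_duid_py_alt duid := by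
  have hdne : (PySem.Str.upper duid).toList ≠ [] := by
    simp [PySem.Chars.upper]
    intro hnil
    exact h hnil
  simp only [infer_region_from_duid_py, infer_region_from_duid_py_alt, inferRegionPrefixLoop]
  generalize hd : PySem.Str.upper duid = d at hdne ⊢
  obtain ⟨c, rest, hcr⟩ := List.exists_cons_of_ne_nil hdne
  simp only [PySem.Str.startswith_eq, PySem.Str.pyGet?_eq,
    PySem.Chars.pyGet?_eq_listPyGet?, hcr, pyGet_zero_cons]
  by_cases h1 : PySem.Chars.startswith (c :: rest) ['Q', 'L', 'D'] = true
  · have hc : c = 'Q' := by simpa using sw_head h1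
    by_cases hsno : PySem.Chars.startswith (c :: rest) ['S', 'N', 'O'] = true
    · have : c = 'S' := by simpa using sw_head hsno
      simp [hc] at this
    · subst hc
      simp [h1, hsno]
      decide
  · by_cases h2 : PySem.Chars.startswith (c :: rest) ['N', 'S', 'W'] = true
    · have hc : c = 'N' := by simpa using sw_head h2
      by_cases hsno : PySem.Chars.startswith (c :: rest) ['S', 'N', 'O'] = true
      · have : c = 'S' := by simpa using sw_head hsno
        simp [hc] at this
      · subst hc
        simp [h1, h2, hsno]
        decide
    · by_cases h3 : PySem.Chars.startswith (c :: rest) ['V', 'I', 'C'] = true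
      · have hc : c = 'V' := by simpa using sw_head h3
        by_cases hsno : PySem.Chars.startswith (c :: rest) ['S', 'N', 'O'] = true
        · have : c = 'S' := by simpa using sw_head hsno
          simp [hc] at this
        · subst hc
          simp [h1, h2, h3, hsno]
          decide
      · by_cases h4 : PySem.Chars.startswith (c :: rest) ['S', 'A', '1'] = true
        · have hc : c = 'S' := by simpa using sw_head h4
          by_cases hsno : PySem.Chars.startswith (c :: rest) ['S', 'N', 'O'] = true
          · -- "SA1" and "SNO" cannot both be prefixes: second characters differ
            obtain ⟨t, ht⟩ := (PySem.Chars.startswith_iff _ _).mp h4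
            obtain ⟨t', ht'⟩ := (PySem.Chars.startswith_iff _ _).mp hsno
            rw [← ht] at ht'
            simp at ht'
          · subst hc
            simp [h1, h2, h3, h4, hsno]
            decide
        · by_cases h5 : PySem.Chars.startswith (c :: rest) ['T', 'A', 'S'] = true
          · have hc : c = 'T' := by simpa using sw_head h5
            by_cases hsno : PySem.Chars.startswith (c :: rest) ['S', 'N', 'O'] = true
            · have : c = 'S' := by simpa using sw_head hsno
              simp [hc] at this
            · subst hc
              simp [h1, h2, h3, h4, h5, hsno]
              decide
          · by_cases h6 : PySem.Chars.startswith (c :: rest) ['S', 'N', 'O'] = true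
            · -- the one genuinely divergent prefix: both sides return "NSW1"
              simp [h1, h2, h3, h4, h5, h6]
            · -- no multi-char prefix matched: both do the single-letter lookup on d[0]
              simp [h1, h2, h3, h4, h5, h6]
              cases hg : (PySem.Dict.ofList
                  [('Q', "QLD1"), ('N', "NSW1"), ('V', "VIC1"), ('S', "SA1"), ('T', "TAS1")]).get? c
                <;> rfl

-- ===== VERDICT (by name: the statement is the Claim_ definition above) =====
theorem infer_region_from_duid_py_spec : Claim_equal_infer_region_from_duid_py := by
  intro duid _ hpre
  exact agree_on_nonempty duid hpre
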